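-- pv_equiv track=rewrite | github.com/GrapeApe43/nocturne21-site | generate-rss.py | split_entries
-- ===== SOURCE A (Python) =====
-- def split_entries(pgdata_text):
--     entries = []
--     current = []
--     depth = 0
--     inside = False
--
--     for line in pgdata_text.splitlines():
--         stripped = line.strip()
--
--         if stripped.startswith("{") and not inside:
--             inside = True
--             depth = 1
--             current = [line]
--             continue
--
--         if inside:
--             current.append(line)
--             depth += line.count("{")
--             depth -= line.count("}")
--
--             if depth == 0:
--                 entries.append("\n".join(current))
--                 inside = False
--                 current = []
--
--     return entries
-- ===== SOURCE B (Python) =====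
-- def split_entries(pgdata_text):
--     lines = pgdata_text.splitlines()
--     n = len(lines)
--     # staged passes: per-line brace deltas, then cumulative prefix sums built once
--     prefix = [0]
--     for l in lines:
--         prefix.append(prefix[-1] + l.count("{") - l.count("}"))
--     entries = []
--     i = 0
--     while i < n:
--         if lines[i].strip().startswith("{"):
--             # block opened at i starts at depth 1; it closes at the first j > i
--             # where 1 + (prefix[j+1] - prefix[i+1]) == 0, i.e. prefix[j+1] == target
--             target = prefix[i + 1] - 1
--             j = next((j for j in range(i + 1, n) if prefix[j + 1] == target), None)
--             if j is None:
--                 break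
--             entries.append("\n".join(lines[i:j + 1]))
--             i = j + 1
--         else:
--             i += 1
--     return entries
-- ===== Notes on version B (the rewrite author's own statement) =====
-- stated objective: alternative
-- what changed: Replaces A's single-pass inside/depth state machine by staged passes: one pass builds a prefix-sum array of per-line brace deltas, then an index scan locates each block's closing line by searching the prefix array for a target value (prefix[i+1]-1) instead of carrying a running depth.
import Mathlib
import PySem

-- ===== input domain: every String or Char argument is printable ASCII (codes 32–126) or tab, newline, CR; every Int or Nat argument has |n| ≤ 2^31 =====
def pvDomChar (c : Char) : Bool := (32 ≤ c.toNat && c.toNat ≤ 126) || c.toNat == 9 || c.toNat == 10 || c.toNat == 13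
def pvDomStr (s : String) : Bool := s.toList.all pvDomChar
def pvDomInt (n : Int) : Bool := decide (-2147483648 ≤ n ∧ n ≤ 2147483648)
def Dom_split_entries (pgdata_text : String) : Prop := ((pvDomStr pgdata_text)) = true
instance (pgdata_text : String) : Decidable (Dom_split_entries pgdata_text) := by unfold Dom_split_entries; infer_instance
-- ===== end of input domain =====

-- B replaces A's one-pass inside/depth state machine by staged passes: a prefix-sum array of
-- per-line brace deltas built once, then an index scan that finds each block's closing line by
-- searching the prefix array for a target value; alternative decomposition, same cost.

-- ===== PORT A =====
def lineStep (st : List String × List String × Int × Bool) (line : String) :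
    List String × List String × Int × Bool :=
  let (entries, current, depth, inside) := st
  let stripped := PySem.Str.strip line
  if PySem.Str.startswith stripped "{" && !inside then
    (entries, [line], 1, true)
  else if inside then
    let current := current ++ [line]
    let depth := depth + (PySem.Str.count line "{" : Int) - (PySem.Str.count line "}" : Int)
    if depth = 0 then (entries ++ [PySem.Str.join "\n" current], [], 0, false)
    else (entries, current, depth, true)
  else (entries, current, depth, inside)

def split_entries (pgdata_text : String) : List String :=
  ((PySem.Str.splitlines pgdata_text).foldl lineStep ([], [], 0, false)).1

-- ===== PORT B =====
-- the while loop: index scan; lines[i:j+1] is ported as (lines.drop i).take (j+1-i), exact here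
-- since 0 ≤ i ≤ j+1; range(i+1, n) with i+1 ≤ n is List.range' (i+1) (n-(i+1))
def bLoop (lines : List String) (pfx : List Int) (n : Nat) (i : Nat) : List String :=
  if hi : i < n then
    if PySem.Str.startswith (PySem.Str.strip (lines.getD i "")) "{" then
      -- target = prefix[i+1] - 1, inlined into the search predicate
      match hf : (List.range' (i + 1) (n - (i + 1))).find?
          (fun j => pfx.getD (j + 1) 0 == pfx.getD (i + 1) 0 - 1) with
      | some j =>
          PySem.Str.join "\n" ((lines.drop i).take (j + 1 - i)) :: bLoop lines pfx n (j + 1)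
      | none => []
    else bLoop lines pfx n (i + 1)
  else []
termination_by n - i
decreasing_by
  · have hj := List.mem_range'.mp (List.mem_of_find?_eq_some hf)
    omega
  · omega

def split_entries_alt (pgdata_text : String) : List String :=
  let lines := PySem.Str.splitlines pgdata_text
  let n := lines.length
  let pfx := lines.foldl
    (fun p l => p ++ [p.getD (p.length - 1) 0
      + (PySem.Str.count l "{" : Int) - (PySem.Str.count l "}" : Int)]) [0]
  bLoop lines pfx n 0

-- ===== PRECONDITION & SPEC =====
def Spec_split_entries (pgdata_text : String) (out : List String) : Prop := out = split_entries_alt pgdata_text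
instance (pgdata_text : String) (out : List String) : Decidable (Spec_split_entries pgdata_text out) := by unfold Spec_split_entries; infer_instance

-- ===== CLAIM (what is proved, stated in full; the proofs are below) =====
def Claim_equal_split_entries : Prop := ∀ (pgdata_text : String), Dom_split_entries pgdata_text → Spec_split_entries pgdata_text (split_entries pgdata_text)

-- ===== LEMMAS AND PROOFS =====

-- proof-only intermediate: A's fold, reorganised as an outer scan with a block-collecting
-- inner recursion; both ports are proved equal to it
def collectBlock (rest : List String) (current : List String) (depth : Int) :
    Option String × List String :=
  if depth = 0 then (some (PySem.Str.join "\n" current), rest)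
  else match rest with
    | [] => (none, [])
    | l :: ls =>
      collectBlock ls (current ++ [l])
        (depth + (PySem.Str.count l "{" : Int) - (PySem.Str.count l "}" : Int))

theorem collectBlock_snd_le (rest : List String) :
    ∀ (current : List String) (depth : Int),
      (collectBlock rest current depth).2.length ≤ rest.length := by
  induction rest with
  | nil => intro current depth; unfold collectBlock; split <;> simp
  | cons l ls ih =>
    intro current depth
    unfold collectBlock
    split
    · simp
    · exact le_trans (ih _ _) (by simp)

def outerLoop (lines : List String) : List String :=
  match lines with
  | [] => []
  | l :: ls =>
    if PySem.Str.startswith (PySem.Str.strip l) "{" then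
      let r := collectBlock ls [l] 1
      match r.1 with
      | some s => s :: outerLoop r.2
      | none => []
    else outerLoop ls
termination_by lines.length
decreasing_by
  · simpa using Nat.lt_succ_of_le (collectBlock_snd_le ls [l] 1)
  · simp

-- while A is inside a block, its fold behaves like collectBlock followed by the outside fold
theorem loopA_inside (rest : List String) :
    ∀ (entries current : List String) (depth : Int), depth ≠ 0 →
      (rest.foldl lineStep (entries, current, depth, true)).1 =
        match collectBlock rest current depth with
        | (some s, rest') => (rest'.foldl lineStep (entries ++ [s], [], 0, false)).1
        | (none, _) => entries := by
  induction rest with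
  | nil =>
    intro entries current depth hd
    simp [collectBlock, hd]
  | cons l ls ih =>
    intro entries current depth hd
    rw [List.foldl_cons]
    have hstep : lineStep (entries, current, depth, true) l =
        if depth + (PySem.Str.count l "{" : Int) - (PySem.Str.count l "}" : Int) = 0 then
          (entries ++ [PySem.Str.join "\n" (current ++ [l])], [], 0, false)
        else (entries, current ++ [l],
              depth + (PySem.Str.count l "{" : Int) - (PySem.Str.count l "}" : Int), true) := by
      simp [lineStep]
    have hcb : collectBlock (l :: ls) current depth =
        collectBlock ls (current ++ [l])
          (depth + (PySem.Str.count l "{" : Int) - (PySem.Str.count l "}" : Int)) := by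
      rw [collectBlock]; simp [hd]
    rw [hstep, hcb]
    by_cases h0 : depth + (PySem.Str.count l "{" : Int) - (PySem.Str.count l "}" : Int) = 0
    · rw [if_pos h0]
      rw [show collectBlock ls (current ++ [l])
            (depth + (PySem.Str.count l "{" : Int) - (PySem.Str.count l "}" : Int)) =
          (some (PySem.Str.join "\n" (current ++ [l])), ls) by rw [collectBlock.eq_def, if_pos h0]]
    · rw [if_neg h0]
      exact ih _ _ _ h0

-- outside a block, A's fold is entries ++ outerLoop of the remaining lines
theorem loopA_outside : ∀ (n : Nat) (lines : List String), lines.length ≤ n →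
    ∀ (entries current : List String) (depth : Int),
      (lines.foldl lineStep (entries, current, depth, false)).1 = entries ++ outerLoop lines := by
  intro n
  induction n with
  | zero =>
    intro lines hlen entries current depth
    have : lines = [] := List.eq_nil_of_length_eq_zero (Nat.le_zero.mp hlen)
    subst this; simp [outerLoop]
  | succ m ih =>
    intro lines hlen entries current depth
    match lines with
    | [] => simp [outerLoop]
    | l :: ls =>
      have hls : ls.length ≤ m := by simpa using Nat.lt_succ_iff.mp (Nat.lt_of_lt_of_le (by simp) hlen)
      rw [List.foldl_cons]
      by_cases hst : PySem.Chars.startswith (PySem.Chars.strip l.toList) ['{'] = true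
      · have hstep : lineStep (entries, current, depth, false) l = (entries, [l], 1, true) := by
          simp [lineStep, hst]
        rw [hstep, loopA_inside ls entries [l] 1 (by decide)]
        rw [show outerLoop (l :: ls) =
              (match (collectBlock ls [l] 1).1 with
               | some s => s :: outerLoop (collectBlock ls [l] 1).2
               | none => []) by rw [outerLoop]; simp [hst]]
        match hcb : collectBlock ls [l] 1 with
        | (some s, rest) =>
          have hr : rest.length ≤ m := by
            have := collectBlock_snd_le ls [l] 1
            rw [hcb] at this
            exact le_trans this hls
          simp [ih rest hr (entries ++ [s]) [] 0]
        | (none, r) => simp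
      · have hstep : lineStep (entries, current, depth, false) l = (entries, current, depth, false) := by
          simp [lineStep, hst]
        rw [hstep, ih ls hls entries current depth]
        rw [show outerLoop (l :: ls) = outerLoop ls by rw [outerLoop]; simp [hst]]

-- per-line brace delta
def braceDelta (l : String) : Int :=
  (PySem.Str.count l "{" : Int) - (PySem.Str.count l "}" : Int)

-- structural form of B's prefix list
def pfxAux (x : Int) : List String → List Int
  | [] => [x]
  | l :: ls => x :: pfxAux (x + braceDelta l) ls

theorem buildPfx_eq (lines : List String) :
    ∀ (acc : List Int) (x : Int),
      lines.foldl
        (fun p l => p ++ [p.getD (p.length - 1) 0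
          + (PySem.Str.count l "{" : Int) - (PySem.Str.count l "}" : Int)]) (acc ++ [x]) =
      acc ++ pfxAux x lines := by
  induction lines with
  | nil => intro acc x; simp [pfxAux]
  | cons l ls ih =>
    intro acc x
    rw [List.foldl_cons]
    have hlast : (acc ++ [x]).getD ((acc ++ [x]).length - 1) 0 = x := by
      simp
    rw [hlast]
    have := ih (acc ++ [x]) (x + (PySem.Str.count l "{" : Int) - (PySem.Str.count l "}" : Int))
    rw [show acc ++ [x] ++ [x + (PySem.Str.count l "{" : Int) - (PySem.Str.count l "}" : Int)] =
        (acc ++ [x]) ++ [x + (PySem.Str.count l "{" : Int) - (PySem.Str.count l "}" : Int)] by simp,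
      this]
    simp [pfxAux, braceDelta]
    ring_nf

theorem pfxAux_getD_zero (lines : List String) (x : Int) :
    (pfxAux x lines).getD 0 0 = x := by
  cases lines <;> simp [pfxAux]

theorem pfxAux_getD_succ (lines : List String) :
    ∀ (x : Int) (k : Nat), k < lines.length →
      (pfxAux x lines).getD (k + 1) 0 =
        (pfxAux x lines).getD k 0 + braceDelta (lines.getD k "") := by
  induction lines with
  | nil => intro x k hk; simp at hk
  | cons l ls ih =>
    intro x k hk
    match k with
    | 0 =>
      simp only [pfxAux, List.getD_cons_succ, List.getD_cons_zero]
      rw [pfxAux_getD_zero]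
    | k + 1 =>
      have hk' : k < ls.length := by simpa using hk
      simpa [pfxAux] using ih (x + braceDelta l) k hk'

-- collectBlock on a suffix, characterised by a prefix-array search
theorem collectBlock_eq_find (lines : List String) (pfx : List Int)
    (hpfx : ∀ k, k < lines.length →
      pfx.getD (k + 1) 0 = pfx.getD k 0 + braceDelta (lines.getD k "")) :
    ∀ (m k : Nat), lines.length - k ≤ m → k ≤ lines.length →
    ∀ (current : List String) (T : Int), pfx.getD k 0 ≠ T →
      collectBlock (lines.drop k) current (pfx.getD k 0 - T) =
        match (List.range' k (lines.length - k)).find? (fun j => pfx.getD (j + 1) 0 == T) with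
        | some j => (some (PySem.Str.join "\n" (current ++ (lines.drop k).take (j + 1 - k))),
                     lines.drop (j + 1))
        | none => (none, []) := by
  intro m
  induction m with
  | zero =>
    intro k hm hk current T hT
    have hkn : k = lines.length := by omega
    subst hkn
    rw [collectBlock.eq_def, if_neg (sub_ne_zero_of_ne hT)]
    simp
  | succ m ih =>
    intro k hm hk current T hT
    by_cases hkn : k = lines.length
    · subst hkn
      rw [collectBlock.eq_def, if_neg (sub_ne_zero_of_ne hT)]
      simp
    · have hklt : k < lines.length := by omega
      have hdrop : lines.drop k = lines[k] :: lines.drop (k + 1) :=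
        List.drop_eq_getElem_cons hklt
      have hrange : List.range' k (lines.length - k) =
          k :: List.range' (k + 1) (lines.length - (k + 1)) := by
        rw [show lines.length - k = (lines.length - (k + 1)) + 1 by omega, List.range'_succ]
      have hgetD : lines.getD k "" = lines[k] := List.getD_eq_getElem lines "" hklt
      have hstep := hpfx k hklt
      rw [hgetD] at hstep
      unfold braceDelta at hstep
      rw [hdrop, collectBlock.eq_def]
      rw [if_neg (by exact sub_ne_zero_of_ne hT)]
      simp only []
      rw [show pfx.getD k 0 - T + (PySem.Str.count lines[k] "{" : Int)
            - (PySem.Str.count lines[k] "}" : Int) = pfx.getD (k + 1) 0 - T by omega]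
      rw [hrange]
      by_cases hT1 : pfx.getD (k + 1) 0 = T
      · rw [List.find?_cons_of_pos (by simp only [beq_iff_eq]; exact hT1)]
        rw [collectBlock.eq_def, if_pos (sub_eq_zero_of_eq hT1)]
        simp only []
        rw [show k + 1 - k = 1 by omega]
        simp only [List.take_succ_cons, List.take_zero]
      · rw [List.find?_cons_of_neg (by simp only [beq_iff_eq]; exact hT1)]
        rw [ih (k + 1) (by omega) (by omega) (current ++ [lines[k]]) T hT1]
        match hfind : (List.range' (k + 1) (lines.length - (k + 1))).find?
            (fun j => pfx.getD (j + 1) 0 == T) with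
        | none => simp
        | some j =>
          have hj := List.mem_range'.mp (List.mem_of_find?_eq_some hfind)
          simp only []
          have htake : current ++ [lines[k]] ++ (lines.drop (k + 1)).take (j + 1 - (k + 1)) =
              current ++ (lines[k] :: lines.drop (k + 1)).take (j + 1 - k) := by
            rw [show j + 1 - k = (j + 1 - (k + 1)) + 1 by omega, List.take_succ_cons]
            simp
          rw [htake, ← hdrop]

-- B's index loop is outerLoop of the remaining lines
set_option maxHeartbeats 1000000 in
theorem bLoop_eq_outerLoop (lines : List String) (pfx : List Int)
    (hpfx : ∀ k, k < lines.length →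
      pfx.getD (k + 1) 0 = pfx.getD k 0 + braceDelta (lines.getD k "")) :
    ∀ (m i : Nat), lines.length - i ≤ m → i ≤ lines.length →
      bLoop lines pfx lines.length i = outerLoop (lines.drop i) := by
  intro m
  induction m with
  | zero =>
    intro i hm hi
    have hin : i = lines.length := by omega
    subst hin
    rw [bLoop]
    simp [outerLoop]
  | succ m ih =>
    intro i hm hi
    by_cases hin : i = lines.length
    · subst hin
      rw [bLoop]
      simp [outerLoop]
    · have hilt : i < lines.length := by omega
      have hdrop : lines.drop i = lines[i] :: lines.drop (i + 1) :=
        List.drop_eq_getElem_cons hilt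
      have hgetD : lines.getD i "" = lines[i] := List.getD_eq_getElem lines "" hilt
      rw [bLoop, dif_pos hilt, hgetD, hdrop]
      by_cases hst : PySem.Str.startswith (PySem.Str.strip lines[i]) "{" = true
      · rw [if_pos hst]
        have hst' : PySem.Chars.startswith (PySem.Chars.strip lines[i].toList) ['{'] = true := by
          simpa [pysem] using hst
        have hT : pfx.getD (i + 1) 0 ≠ pfx.getD (i + 1) 0 - 1 := by omega
        have hcb := collectBlock_eq_find lines pfx hpfx (lines.length - (i + 1)) (i + 1)
          le_rfl (by omega) [lines[i]] (pfx.getD (i + 1) 0 - 1) hT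
        rw [show pfx.getD (i + 1) 0 - (pfx.getD (i + 1) 0 - 1) = 1 by ring] at hcb
        rcases hfind : (List.range' (i + 1) (lines.length - (i + 1))).find?
            (fun j => pfx.getD (j + 1) 0 == pfx.getD (i + 1) 0 - 1) with _ | j
        · rw [hfind] at hcb
          have houter : outerLoop (lines[i] :: lines.drop (i + 1)) = [] := by
            rw [outerLoop]; simp [hst', hcb]
          rw [houter]
        · rw [hfind] at hcb
          have houter : outerLoop (lines[i] :: lines.drop (i + 1)) =
              PySem.Str.join "\n" ([lines[i]] ++ (lines.drop (i + 1)).take (j + 1 - (i + 1))) ::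
                outerLoop (lines.drop (j + 1)) := by
            rw [outerLoop]; simp [hst', hcb]
          rw [houter]
          split
          next j' hf =>
            simp only [Option.some.injEq] at hf
            subst hf
            have hj := List.mem_range'.mp (List.mem_of_find?_eq_some hfind)
            have htake : (lines[i] :: lines.drop (i + 1)).take (j + 1 - i) =
                [lines[i]] ++ (lines.drop (i + 1)).take (j + 1 - (i + 1)) := by
              rw [show j + 1 - i = (j + 1 - (i + 1)) + 1 by omega, List.take_succ_cons]
              simp
            rw [htake, ih (j + 1) (by omega) (by omega)]
          next heq => cases heq
      · rw [if_neg hst]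
        have hst' : PySem.Chars.startswith (PySem.Chars.strip lines[i].toList) ['{'] = false := by
          rw [Bool.eq_false_iff]
          simpa [pysem] using hst
        rw [show outerLoop (lines[i] :: lines.drop (i + 1)) = outerLoop (lines.drop (i + 1)) by
            rw [outerLoop]; simp [hst']]
        exact ih (i + 1) (by omega) (by omega)

-- ===== VERDICT (by name: the statement is the Claim_ definition above) =====
theorem split_entries_spec : Claim_equal_split_entries := by
  intro t _
  unfold Spec_split_entries split_entries split_entries_alt
  have hbuild := buildPfx_eq (PySem.Str.splitlines t) [] 0
  simp only [List.nil_append] at hbuild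
  show (List.foldl lineStep ([], [], 0, false) (PySem.Str.splitlines t)).1 =
    bLoop (PySem.Str.splitlines t)
      (List.foldl (fun p l => p ++ [p.getD (p.length - 1) 0
        + (PySem.Str.count l "{" : Int) - (PySem.Str.count l "}" : Int)]) [0]
        (PySem.Str.splitlines t))
      (PySem.Str.splitlines t).length 0
  rw [hbuild, bLoop_eq_outerLoop (PySem.Str.splitlines t) (pfxAux 0 (PySem.Str.splitlines t))
      (fun k hk => pfxAux_getD_succ (PySem.Str.splitlines t) 0 k hk)
      (PySem.Str.splitlines t).length 0 (by omega) (by omega), List.drop_zero]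
  simpa using loopA_outside (PySem.Str.splitlines t).length (PySem.Str.splitlines t) le_rfl [] [] 0
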